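-- pv_equiv track=rewrite | github.com/amolenaar/adventofcode2019 | 03/day3.py | path_to_segments
-- ===== SOURCE A (Python) =====
-- def path_to_segments(path):
--     pos = (0, 0)
--     for (dir, dist) in path:
--         curpos = pos
--         if dir == "U":
--             pos = (pos[0], pos[1] + dist)
--         elif dir == "D":
--             pos = (pos[0], pos[1] - dist)
--         elif dir == "R":
--             pos = (pos[0] + dist, pos[1])
--         elif dir == "L":
--             pos = (pos[0] - dist, pos[1])
--         yield (curpos, pos)
-- ===== SOURCE B (Python) =====
-- _DELTAS = {"U": (0, 1), "D": (0, -1), "R": (1, 0), "L": (-1, 0)}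
--
-- def path_to_segments(path):
--     # Divide-and-translate recursion: the segments of the tail are computed
--     # relative to the ORIGIN, then the whole sub-result is translated by the
--     # first move's displacement.  Unknown directions contribute a zero move.
--     path = list(path)
--     if not path:
--         return []
--     dir, dist = path[0]
--     ux, uy = _DELTAS.get(dir, (0, 0))
--     dx, dy = ux * dist, uy * dist
--     rest = path_to_segments(path[1:])
--     return [((0, 0), (dx, dy))] + [
--         ((x1 + dx, y1 + dy), (x2 + dx, y2 + dy)) for ((x1, y1), (x2, y2)) in rest
--     ]
-- ===== Notes on version B (the rewrite author's own statement) =====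
-- stated objective: alternative
-- what changed: B replaces A's stateful single-pass generator by a divide-and-translate recursion: it solves the tail subproblem relative to the origin with no running position, then translates the entire sub-result by the first move's displacement; unknown directions contribute a zero move.
import Mathlib
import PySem

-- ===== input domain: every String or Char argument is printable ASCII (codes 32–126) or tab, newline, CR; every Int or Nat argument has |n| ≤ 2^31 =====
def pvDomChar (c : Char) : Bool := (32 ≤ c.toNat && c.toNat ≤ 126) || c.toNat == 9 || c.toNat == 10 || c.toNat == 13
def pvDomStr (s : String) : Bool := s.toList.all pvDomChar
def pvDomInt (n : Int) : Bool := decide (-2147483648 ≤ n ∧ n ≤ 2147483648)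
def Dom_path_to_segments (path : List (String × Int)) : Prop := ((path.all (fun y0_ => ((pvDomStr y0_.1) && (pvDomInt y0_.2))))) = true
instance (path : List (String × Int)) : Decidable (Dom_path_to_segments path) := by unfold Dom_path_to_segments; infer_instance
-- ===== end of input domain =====

-- B replaces A's stateful single-pass generator by a divide-and-translate recursion (tail solved relative to the origin, then translated by the first move's displacement); alternative decomposition, not faster. A is a generator; equivalence is about the materialised sequence.


-- ===== PORT A =====
-- the generator's loop: state pos, one yield per element
def pvAGo (path : List (String × Int)) (pos : Int × Int) : List ((Int × Int) × (Int × Int)) :=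
  match path with
  | [] => []
  | (dir, dist) :: rest =>
    let newpos :=
      if dir == "U" then (pos.1, pos.2 + dist)
      else if dir == "D" then (pos.1, pos.2 - dist)
      else if dir == "R" then (pos.1 + dist, pos.2)
      else if dir == "L" then (pos.1 - dist, pos.2)
      else pos
    (pos, newpos) :: pvAGo rest newpos

def path_to_segments (path : List (String × Int)) : List ((Int × Int) × (Int × Int)) :=
  pvAGo path (0, 0)

-- ===== PORT B =====
def pvDeltas : PySem.Dict String (Int × Int) :=
  PySem.Dict.ofList [("U", (0, 1)), ("D", (0, -1)), ("R", (1, 0)), ("L", (-1, 0))]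

def path_to_segments_alt (path : List (String × Int)) : List ((Int × Int) × (Int × Int)) :=
  match path with
  | [] => []
  | (dir, dist) :: rest =>
    let u := PySem.Dict.getD pvDeltas dir (0, 0)
    let d : Int × Int := (u.1 * dist, u.2 * dist)
    ((0, 0), d) ::
      (path_to_segments_alt rest).map
        (fun s => ((s.1.1 + d.1, s.1.2 + d.2), (s.2.1 + d.1, s.2.2 + d.2)))

-- ===== PRECONDITION & SPEC =====
def Spec_path_to_segments (path : List (String × Int)) (out : List ((Int × Int) × (Int × Int))) : Prop := out = path_to_segments_alt path
instance (path : List (String × Int)) (out : List ((Int × Int) × (Int × Int))) : Decidable (Spec_path_to_segments path out) := by unfold Spec_path_to_segments; infer_instance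

-- ===== CLAIM (what is proved, stated in full; the proofs are below) =====
def Claim_equal_path_to_segments : Prop := ∀ (path : List (String × Int)), Dom_path_to_segments path → Spec_path_to_segments path (path_to_segments path)

-- ===== LEMMAS AND PROOFS =====

def pvShift (d : Int × Int) (s : (Int × Int) × (Int × Int)) : (Int × Int) × (Int × Int) :=
  ((s.1.1 + d.1, s.1.2 + d.2), (s.2.1 + d.1, s.2.2 + d.2))

-- A's step equals the delta-based displacement (unknown directions: zero delta)
lemma pvStep_agree (dir : String) (dist : Int) (pos : Int × Int) :
    (if dir == "U" then (pos.1, pos.2 + dist)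
     else if dir == "D" then (pos.1, pos.2 - dist)
     else if dir == "R" then (pos.1 + dist, pos.2)
     else if dir == "L" then (pos.1 - dist, pos.2)
     else pos)
    = (pos.1 + (PySem.Dict.getD pvDeltas dir (0, 0)).1 * dist,
       pos.2 + (PySem.Dict.getD pvDeltas dir (0, 0)).2 * dist) := by
  split_ifs with h1 h2 h3 h4
  · rw [beq_iff_eq] at h1; subst h1
    have : pvDeltas.getD "U" (0,0) = (0,1) := by decide
    rw [this]; simp
  · rw [beq_iff_eq] at h2; subst h2
    have : pvDeltas.getD "D" (0,0) = (0,-1) := by decide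
    rw [this]; simp [Prod.ext_iff]; omega
  · rw [beq_iff_eq] at h3; subst h3
    have : pvDeltas.getD "R" (0,0) = (1,0) := by decide
    rw [this]; simp
  · rw [beq_iff_eq] at h4; subst h4
    have : pvDeltas.getD "L" (0,0) = (-1,0) := by decide
    rw [this]; simp [Prod.ext_iff]; ring
  · simp only [beq_iff_eq] at h1 h2 h3 h4
    have hit : pvDeltas.items = [("U",(0,1)),("D",(0,-1)),("R",(1,0)),("L",(-1,0))] := by decide
    have e1 : ("U" == dir) = false := beq_false_of_ne (Ne.symm h1)
    have e2 : ("D" == dir) = false := beq_false_of_ne (Ne.symm h2)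
    have e3 : ("R" == dir) = false := beq_false_of_ne (Ne.symm h3)
    have e4 : ("L" == dir) = false := beq_false_of_ne (Ne.symm h4)
    have : pvDeltas.getD dir (0,0) = (0,0) := by
      simp [PySem.Dict.getD, PySem.Dict.get?, hit, List.find?, e1, e2, e3, e4]
    rw [this]; simp

-- A from any position is B's origin-relative result translated by that position
lemma pvAGo_eq_shift (path : List (String × Int)) (pos : Int × Int) :
    pvAGo path pos = (path_to_segments_alt path).map (pvShift pos) := by
  induction path generalizing pos with
  | nil => simp [pvAGo, path_to_segments_alt]
  | cons p rest ih =>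
    obtain ⟨dir, dist⟩ := p
    simp only [pvAGo, path_to_segments_alt]
    rw [pvStep_agree dir dist pos, ih]
    simp only [List.map_cons, List.map_map]
    refine congrArg₂ List.cons ?_ ?_
    · simp only [pvShift, Prod.mk.injEq]
      and_intros <;> ring_nf
    · apply List.map_congr_left
      intro s _
      simp only [Function.comp_apply, pvShift, Prod.mk.injEq]
      and_intros <;> ring

lemma pvShift_zero (s : (Int × Int) × (Int × Int)) : pvShift (0, 0) s = s := by
  simp [pvShift]

-- ===== VERDICT (by name: the statement is the Claim_ definition above) =====
theorem path_to_segments_spec : Claim_equal_path_to_segments := by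
  intro path _
  show path_to_segments path = path_to_segments_alt path
  show pvAGo path (0, 0) = path_to_segments_alt path
  rw [pvAGo_eq_shift]
  rw [show pvShift (0, 0) = id from funext pvShift_zero, List.map_id]
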